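-- pv_equiv track=rewrite | github.com/endtailer007/switchcase | sumdiff.py | diffOfSum
-- ===== SOURCE A (Python) =====
-- def diffOfSum(n,m):
--     nd=0
--     d=0
--     if n<0 or m<0:
--         return 0
--     else:
--         for i in range(m+1):
--             if i%n==0:
--                 d+=i
--             else:
--                 nd+=i
--     return abs(nd-d)
-- ===== SOURCE B (Python) =====
-- def diffOfSum(n, m):
--     if n < 0 or m < 0:
--         return 0
--     total = m * (m + 1) // 2
--     k = m // n
--     mult = n * k * (k + 1) // 2
--     return abs(total - 2 * mult)
-- ===== Notes on version B (the rewrite author's own statement) =====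
-- stated objective: faster
-- what changed: Replaces the O(m) loop over range(m+1) with closed-form arithmetic-series formulas for the total sum and the sum of multiples of n.
import Mathlib
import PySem

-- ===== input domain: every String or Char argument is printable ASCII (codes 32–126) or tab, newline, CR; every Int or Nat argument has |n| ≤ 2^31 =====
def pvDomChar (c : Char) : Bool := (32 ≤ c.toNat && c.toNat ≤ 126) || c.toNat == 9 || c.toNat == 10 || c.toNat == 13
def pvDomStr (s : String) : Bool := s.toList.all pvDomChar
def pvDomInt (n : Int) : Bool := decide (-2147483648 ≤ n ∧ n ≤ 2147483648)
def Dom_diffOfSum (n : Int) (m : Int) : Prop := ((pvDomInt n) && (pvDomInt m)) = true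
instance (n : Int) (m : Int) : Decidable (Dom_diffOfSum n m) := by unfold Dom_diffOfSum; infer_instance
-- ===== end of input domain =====

-- B replaces A's O(m) summation loop by closed-form arithmetic-series formulas (equal return values; measured faster).

-- ===== PORT A =====
def diffOfSum (n : Int) (m : Int) : Int :=
  if n < 0 ∨ m < 0 then 0
  else
    let p := (PySem.List.pyRange 0 (m + 1) 1).foldl
      (fun (s : Int × Int) i => if PySem.Int.mod i n = 0 then (s.1, s.2 + i) else (s.1 + i, s.2))
      (0, 0)
    |p.1 - p.2|

-- ===== PORT B =====
def diffOfSum_alt (n : Int) (m : Int) : Int :=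
  if n < 0 ∨ m < 0 then 0
  else
    let total := PySem.Int.floordiv (m * (m + 1)) 2
    let k := PySem.Int.floordiv m n
    let mult := PySem.Int.floordiv (n * k * (k + 1)) 2
    |total - 2 * mult|

-- ===== PRECONDITION & SPEC =====
-- Pre_ excludes exactly n = 0 with 0 ≤ m, where Python A raises ZeroDivisionError at '0 % 0' (B raises there too).
def Pre_diffOfSum (n : Int) (m : Int) : Prop := ¬ (n = 0 ∧ 0 ≤ m)
instance (n : Int) (m : Int) : Decidable (Pre_diffOfSum n m) := by unfold Pre_diffOfSum; infer_instance
def pvWitness_diffOfSum : Int × Int := (3, 10)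

def Spec_diffOfSum (n : Int) (m : Int) (out : Int) : Prop := out = diffOfSum_alt n m
instance (n : Int) (m : Int) (out : Int) : Decidable (Spec_diffOfSum n m out) := by unfold Spec_diffOfSum; infer_instance

-- ===== CLAIM (what is proved, stated in full; the proofs are below) =====
def Claim_equal_diffOfSum : Prop := ∀ (n : Int) (m : Int), Dom_diffOfSum n m → Pre_diffOfSum n m → Spec_diffOfSum n m (diffOfSum n m)

-- ===== LEMMAS AND PROOFS =====

-- running total 0 + 1 + ... + (j-1)
def pvTsum : Nat → Int
  | 0 => 0
  | j + 1 => pvTsum j + (j : Int)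

-- running sum of those i < j with n ∣ i
def pvMsum (n : Int) : Nat → Int
  | 0 => 0
  | j + 1 => pvMsum n j + (if n ∣ (j : Int) then (j : Int) else 0)

theorem ediv_succ_of_dvd {n j : Int} (hn : 0 < n) (h : n ∣ (j + 1)) :
    (j + 1) / n = j / n + 1 := by
  obtain ⟨q, hq⟩ := h
  have h1 : (j + 1) / n = q ∧ (j + 1) % n = 0 :=
    (Int.ediv_emod_unique hn).mpr ⟨by linear_combination -hq, le_rfl, hn⟩
  have h2 : j / n = q - 1 ∧ j % n = n - 1 :=
    (Int.ediv_emod_unique hn).mpr ⟨by linear_combination -hq, by omega, by omega⟩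
  rw [h1.1, h2.1]; ring

theorem ediv_succ_of_not_dvd {n j : Int} (hn : 0 < n) (h : ¬ n ∣ (j + 1)) :
    (j + 1) / n = j / n := by
  have he : j % n + n * (j / n) = j := Int.emod_add_mul_ediv j n
  have hb1 : 0 ≤ j % n := Int.emod_nonneg j (by omega)
  have hb2 : j % n < n := Int.emod_lt_of_pos j hn
  have hr : j % n + 1 < n := by
    by_contra hcon
    have h3 : j % n = n - 1 := by omega
    exact h ⟨j / n + 1, by linear_combination -he + h3⟩
  exact ((Int.ediv_emod_unique hn).mpr ⟨by linear_combination he, by omega, hr⟩).1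

theorem pvTsum_closed (j : Nat) : 2 * pvTsum j = (j : Int) * ((j : Int) - 1) := by
  induction j with
  | zero => simp [pvTsum]
  | succ j ih =>
    simp only [pvTsum]
    push_cast
    linear_combination ih

theorem pvMsum_closed {n : Int} (hn : 0 < n) (j : Nat) :
    2 * pvMsum n (j + 1) = n * ((j : Int) / n) * ((j : Int) / n + 1) := by
  induction j with
  | zero => simp [pvMsum]
  | succ j ih =>
    show 2 * (pvMsum n (j + 1) + (if n ∣ ((j + 1 : Nat) : Int) then ((j + 1 : Nat) : Int) else 0)) = _
    push_cast
    by_cases h : n ∣ ((j : Int) + 1)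
    · obtain ⟨q, hq⟩ := h
      have hdiv : ((j : Int) + 1) / n = (j : Int) / n + 1 := ediv_succ_of_dvd hn ⟨q, hq⟩
      have hq' : ((j : Int) + 1) / n = q := by
        rw [hq, Int.mul_ediv_cancel_left _ (by omega)]
      have hjn : (j : Int) / n = q - 1 := by omega
      rw [if_pos ⟨q, hq⟩, hdiv, hjn]
      rw [hjn] at ih
      linear_combination ih + 2 * hq
    · rw [if_neg h, ediv_succ_of_not_dvd hn h]
      linear_combination ih

theorem fold_char (n : Int) (j : Nat) :
    ((PySem.List.pyRange 0 (j : Int) 1).foldl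
      (fun (s : Int × Int) i => if PySem.Int.mod i n = 0 then (s.1, s.2 + i) else (s.1 + i, s.2))
      (0, 0)) = (pvTsum j - pvMsum n j, pvMsum n j) := by
  induction j with
  | zero => simp [PySem.List.pyRange_one_eq_nil le_rfl, pvTsum, pvMsum]
  | succ j ih =>
    have hcast : ((j + 1 : Nat) : Int) = (j : Int) + 1 := by push_cast; ring
    rw [hcast, PySem.List.pyRange_one_succ_right (by positivity), List.foldl_append, ih]
    show (if PySem.Int.mod (j : Int) n = 0 then _ else _) =
      (pvTsum (j + 1) - pvMsum n (j + 1), pvMsum n (j + 1))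
    show _ = (pvTsum j + (j : Int) - (pvMsum n j + (if n ∣ (j : Int) then (j : Int) else 0)),
      pvMsum n j + (if n ∣ (j : Int) then (j : Int) else 0))
    simp only [PySem.Int.mod_eq_zero_iff_dvd]
    split_ifs with h
    · exact Prod.ext (by ring) (by ring)
    · exact Prod.ext (by ring) (by ring)

-- ===== VERDICT (by name: the statement is the Claim_ definition above) =====
theorem diffOfSum_spec : Claim_equal_diffOfSum := by
  intro n m _ hpre
  unfold Spec_diffOfSum diffOfSum diffOfSum_alt
  by_cases hneg : n < 0 ∨ m < 0
  · simp [hneg]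
  · have hn : 0 < n := by
      unfold Pre_diffOfSum at hpre; omega
    have hm : 0 ≤ m := by omega
    simp only [if_neg hneg]
    have hj : ((m.toNat + 1 : Nat) : Int) = m + 1 := by omega
    have hfold : ((PySem.List.pyRange 0 (m + 1) 1).foldl
        (fun (s : Int × Int) i => if PySem.Int.mod i n = 0 then (s.1, s.2 + i) else (s.1 + i, s.2))
        (0, 0)) = (pvTsum (m.toNat + 1) - pvMsum n (m.toNat + 1), pvMsum n (m.toNat + 1)) := by
      rw [← hj]; exact fold_char n _
    rw [hfold]
    have hmc : ((m.toNat : Nat) : Int) = m := by omega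
    have ht := pvTsum_closed (m.toNat + 1)
    rw [hj] at ht
    have hs := pvMsum_closed hn m.toNat
    rw [hmc] at hs
    have hfd2 : ∀ a : Int, PySem.Int.floordiv a 2 = a / 2 :=
      fun a => PySem.Int.floordiv_eq_ediv_of_pos (by omega)
    have hfdn : PySem.Int.floordiv m n = m / n := PySem.Int.floordiv_eq_ediv_of_pos hn
    rw [hfd2, hfd2, hfdn]
    have htot : m * (m + 1) / 2 = pvTsum (m.toNat + 1) := by
      have h2 : m * (m + 1) = 2 * pvTsum (m.toNat + 1) := by linear_combination -ht
      rw [h2, Int.mul_ediv_cancel_left _ two_ne_zero]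
    have hmult : n * (m / n) * (m / n + 1) / 2 = pvMsum n (m.toNat + 1) := by
      rw [← hs, Int.mul_ediv_cancel_left _ two_ne_zero]
    rw [htot, hmult]
    dsimp only
    congr 1
    ring
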